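-- pv_equiv track=rewrite | github.com/ZygimantasB/etherscan_explorer | services/decoder.py | get_transaction_summary
-- ===== SOURCE A (Python) =====
-- def categorize_transaction(tx):
--     """Categorize transaction by type."""
--     input_data = tx.get('input', '0x')
--     to_addr = tx.get('to', '').lower()
--
--     # Contract creation
--     if not to_addr:
--         return 'contract_creation'
--
--     # Simple ETH transfer
--     if input_data == '0x' or len(input_data) < 10:
--         return 'transfer'
--
--     selector = input_data[:10].lower()
--
--     # Swap transactions
--     swap_selectors = ['0x38ed1739', '0x7ff36ab5', '0x18cbafe5', '0xc04b8d59', '0x12aa3caf', '0x0502b1c5']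
--     if selector in swap_selectors:
--         return 'swap'
--
--     # Liquidity
--     liquidity_selectors = ['0xe8e33700', '0xf305d719', '0xbaa2abde', '0x02751cec']
--     if selector in liquidity_selectors:
--         return 'liquidity'
--
--     # NFT transactions
--     nft_selectors = ['0x42842e0e', '0xb88d4fde', '0xfb0f3ee1', '0x87201b41', '0x9a1fc3a7']
--     if selector in nft_selectors:
--         return 'nft'
--
--     # Token approvals
--     if selector == '0x095ea7b3':
--         return 'approval'
--
--     # Token transfers
--     if selector in ['0xa9059cbb', '0x23b872dd']:
--         return 'token_transfer'
--
--     # Lending/Borrowing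
--     lending_selectors = ['0xe8eda9df', '0x69328dec', '0xa415bcad', '0x573ade81', '0x617ba037', '0xa0712d68', '0xdb006a75', '0xc5ebeaec']
--     if selector in lending_selectors:
--         return 'lending'
--
--     # Staking
--     if selector == '0xa1903eab':
--         return 'staking'
--
--     return 'other'
--
-- def get_transaction_summary(transactions):
--     """Get summary of transaction types."""
--     summary = {
--         'transfer': 0,
--         'swap': 0,
--         'liquidity': 0,
--         'nft': 0,
--         'approval': 0,
--         'token_transfer': 0,
--         'lending': 0,
--         'staking': 0,
--         'contract_creation': 0,
--         'other': 0
--     }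
--
--     for tx in transactions:
--         category = categorize_transaction(tx)
--         summary[category] = summary.get(category, 0) + 1
--
--     return summary
-- ===== SOURCE B (Python) =====
-- _GROUPS = [
--     ('transfer', ['']),
--     ('swap', ['0x38ed1739', '0x7ff36ab5', '0x18cbafe5', '0xc04b8d59', '0x12aa3caf', '0x0502b1c5']),
--     ('liquidity', ['0xe8e33700', '0xf305d719', '0xbaa2abde', '0x02751cec']),
--     ('nft', ['0x42842e0e', '0xb88d4fde', '0xfb0f3ee1', '0x87201b41', '0x9a1fc3a7']),
--     ('approval', ['0x095ea7b3']),
--     ('token_transfer', ['0xa9059cbb', '0x23b872dd']),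
--     ('lending', ['0xe8eda9df', '0x69328dec', '0xa415bcad', '0x573ade81', '0x617ba037', '0xa0712d68', '0xdb006a75', '0xc5ebeaec']),
--     ('staking', ['0xa1903eab']),
--     ('contract_creation', [None]),
-- ]
--
--
-- def _tx_key(tx):
--     """Raw grouping key: None = contract creation, '' = plain transfer, else the selector."""
--     if not tx.get('to', '').lower():
--         return None
--     inp = tx.get('input', '0x')
--     if inp == '0x' or len(inp) < 10:
--         return ''
--     return inp[:10].lower()
--
--
-- def get_transaction_summary(transactions):
--     hist = {}
--     for tx in transactions:
--         k = _tx_key(tx)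
--         hist[k] = hist.get(k, 0) + 1
--     summary = {cat: sum(hist.get(k, 0) for k in keys) for cat, keys in _GROUPS}
--     summary['other'] = len(transactions) - sum(summary.values())
--     return summary
-- ===== Notes on version B (the rewrite author's own statement) =====
-- stated objective: alternative
-- what changed: B replaces A's per-transaction if/elif classification with incremental per-category counting by a two-stage aggregation: one pass builds a histogram of raw grouping keys (None for creation, '' for plain transfer, else the 10-char selector), then each category count is the sum of its selectors' histogram entries and 'other' is computed as the complement of the total.
import Mathlib
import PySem

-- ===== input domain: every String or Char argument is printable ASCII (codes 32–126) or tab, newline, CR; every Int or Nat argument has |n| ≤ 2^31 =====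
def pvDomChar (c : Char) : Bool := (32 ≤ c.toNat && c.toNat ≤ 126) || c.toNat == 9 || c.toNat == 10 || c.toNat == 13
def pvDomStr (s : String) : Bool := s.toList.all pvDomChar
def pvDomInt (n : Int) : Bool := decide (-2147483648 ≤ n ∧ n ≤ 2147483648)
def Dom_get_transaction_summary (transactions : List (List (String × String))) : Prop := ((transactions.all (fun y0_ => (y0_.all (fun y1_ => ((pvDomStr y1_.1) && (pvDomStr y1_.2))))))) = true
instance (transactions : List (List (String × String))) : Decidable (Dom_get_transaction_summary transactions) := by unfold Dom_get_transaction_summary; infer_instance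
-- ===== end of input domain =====

-- B replaces A's per-transaction if/elif classification and incremental per-category increments by a
-- two-stage aggregation: a histogram of raw grouping keys, then per-category sums plus 'other' as the
-- complement of the total (alternative decomposition; same cost).

-- ===== PORT A =====
def categorize_transaction (tx : List (String × String)) : String :=
  let input_data := (PySem.Dict.mk tx).getD "input" "0x"
  let to_addr := PySem.Str.lower ((PySem.Dict.mk tx).getD "to" "")
  if to_addr = "" then "contract_creation"
  else if input_data = "0x" ∨ PySem.Str.len input_data < 10 then "transfer"
  else
    let selector := PySem.Str.lower (PySem.Str.slice input_data none (some 10))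
    if selector ∈ ["0x38ed1739", "0x7ff36ab5", "0x18cbafe5", "0xc04b8d59", "0x12aa3caf", "0x0502b1c5"] then "swap"
    else if selector ∈ ["0xe8e33700", "0xf305d719", "0xbaa2abde", "0x02751cec"] then "liquidity"
    else if selector ∈ ["0x42842e0e", "0xb88d4fde", "0xfb0f3ee1", "0x87201b41", "0x9a1fc3a7"] then "nft"
    else if selector = "0x095ea7b3" then "approval"
    else if selector ∈ ["0xa9059cbb", "0x23b872dd"] then "token_transfer"
    else if selector ∈ ["0xe8eda9df", "0x69328dec", "0xa415bcad", "0x573ade81", "0x617ba037", "0xa0712d68", "0xdb006a75", "0xc5ebeaec"] then "lending"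
    else if selector = "0xa1903eab" then "staking"
    else "other"

def get_transaction_summary (transactions : List (List (String × String))) : List (String × Int) :=
  let summary : PySem.Dict String Int := PySem.Dict.mk
    [("transfer", 0), ("swap", 0), ("liquidity", 0), ("nft", 0), ("approval", 0),
     ("token_transfer", 0), ("lending", 0), ("staking", 0), ("contract_creation", 0), ("other", 0)]
  let summary := transactions.foldl (fun s tx =>
      let category := categorize_transaction tx
      s.insert category (s.getD category 0 + 1)) summary
  summary.items

-- ===== PORT B =====
def pvGroups : List (String × List (Option String)) :=
  [("transfer", [some ""]),
   ("swap", [some "0x38ed1739", some "0x7ff36ab5", some "0x18cbafe5", some "0xc04b8d59", some "0x12aa3caf", some "0x0502b1c5"]),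
   ("liquidity", [some "0xe8e33700", some "0xf305d719", some "0xbaa2abde", some "0x02751cec"]),
   ("nft", [some "0x42842e0e", some "0xb88d4fde", some "0xfb0f3ee1", some "0x87201b41", some "0x9a1fc3a7"]),
   ("approval", [some "0x095ea7b3"]),
   ("token_transfer", [some "0xa9059cbb", some "0x23b872dd"]),
   ("lending", [some "0xe8eda9df", some "0x69328dec", some "0xa415bcad", some "0x573ade81", some "0x617ba037", some "0xa0712d68", some "0xdb006a75", some "0xc5ebeaec"]),
   ("staking", [some "0xa1903eab"]),
   ("contract_creation", [(none : Option String)])]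

-- raw grouping key: none = contract creation (Python None), some "" = plain transfer, else the selector
def tx_key (tx : List (String × String)) : Option String :=
  if PySem.Str.lower ((PySem.Dict.mk tx).getD "to" "") = "" then none
  else
    let inp := (PySem.Dict.mk tx).getD "input" "0x"
    if inp = "0x" ∨ PySem.Str.len inp < 10 then some ""
    else some (PySem.Str.lower (PySem.Str.slice inp none (some 10)))

-- Python builds the summary dict from fresh distinct keys in this order, so its items are this list;
-- summary['other'] = len(transactions) - sum(summary.values()) appends the final pair.
def get_transaction_summary_alt (transactions : List (List (String × String))) : List (String × Int) :=
  let hist : PySem.Dict (Option String) Int :=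
    transactions.foldl (fun d tx =>
      let k := tx_key tx
      d.insert k (d.getD k 0 + 1)) PySem.Dict.empty
  let summary := pvGroups.map (fun g => (g.1, (g.2.map (fun k => hist.getD k 0)).sum))
  summary ++ [("other", PySem.List.len transactions - (summary.map (·.2)).sum)]

-- ===== PRECONDITION & SPEC =====
def Spec_get_transaction_summary (transactions : List (List (String × String))) (out : List (String × Int)) : Prop := out = get_transaction_summary_alt transactions
instance (transactions : List (List (String × String))) (out : List (String × Int)) : Decidable (Spec_get_transaction_summary transactions out) := by unfold Spec_get_transaction_summary; infer_instance

-- ===== CLAIM (what is proved, stated in full; the proofs are below) =====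
def Claim_equal_get_transaction_summary : Prop := ∀ (transactions : List (List (String × String))), Dom_get_transaction_summary transactions → Spec_get_transaction_summary transactions (get_transaction_summary transactions)

-- ===== LEMMAS AND PROOFS =====

-- the ten category names, in A's insertion order (proof-side helper)
def pvCategories : List String :=
  ["transfer", "swap", "liquidity", "nft", "approval",
   "token_transfer", "lending", "staking", "contract_creation", "other"]

-- A's selector cascade, as a function (proof-side helper)
def pvCascade (s : String) : String :=
  if s ∈ ["0x38ed1739", "0x7ff36ab5", "0x18cbafe5", "0xc04b8d59", "0x12aa3caf", "0x0502b1c5"] then "swap"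
  else if s ∈ ["0xe8e33700", "0xf305d719", "0xbaa2abde", "0x02751cec"] then "liquidity"
  else if s ∈ ["0x42842e0e", "0xb88d4fde", "0xfb0f3ee1", "0x87201b41", "0x9a1fc3a7"] then "nft"
  else if s = "0x095ea7b3" then "approval"
  else if s ∈ ["0xa9059cbb", "0x23b872dd"] then "token_transfer"
  else if s ∈ ["0xe8eda9df", "0x69328dec", "0xa415bcad", "0x573ade81", "0x617ba037", "0xa0712d68", "0xdb006a75", "0xc5ebeaec"] then "lending"
  else if s = "0xa1903eab" then "staking"
  else "other"

-- category of a raw grouping key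
def pvKeyCat : Option String → String
  | none => "contract_creation"
  | some s => if s = "" then "transfer" else pvCascade s

theorem lower_slice10_ne (s : String) (h : ¬ PySem.Str.len s < 10) :
    PySem.Str.lower (PySem.Str.slice s none (some 10)) ≠ "" := by
  intro he
  have ht : (PySem.Str.lower (PySem.Str.slice s none (some 10))).toList = [] := by rw [he]; rfl
  have hlen : (10:Int) ≤ PySem.Str.len s := by omega
  rw [PySem.Str.len_eq] at hlen
  simp only [PySem.Str.toList_lower, PySem.Str.toList_slice, PySem.Chars.lower,
    PySem.Chars.slice_eq_listSlice] at ht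
  rw [show ((10:Int)) = ((10:Nat):Int) by norm_num, PySem.List.slice_to_natCast] at ht
  simp only [List.map_eq_nil_iff, List.take_eq_nil_iff] at ht
  rcases ht with h1|h1
  · exact absurd h1 (by decide)
  · rw [h1] at hlen; simp at hlen

theorem cat_eq_keyCat (tx : List (String × String)) :
    categorize_transaction tx = pvKeyCat (tx_key tx) := by
  unfold categorize_transaction tx_key
  by_cases ht : PySem.Str.lower ((PySem.Dict.mk tx).getD "to" "") = ""
  · simp only [ht]; rfl
  · rw [if_neg ht, if_neg ht]
    by_cases hx : (PySem.Dict.mk tx).getD "input" "0x" = "0x" ∨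
        PySem.Str.len ((PySem.Dict.mk tx).getD "input" "0x") < 10
    · rw [if_pos hx, if_pos hx]; rfl
    · rw [if_neg hx, if_neg hx]
      have hne : PySem.Str.lower (PySem.Str.slice ((PySem.Dict.mk tx).getD "input" "0x") none (some 10)) ≠ "" :=
        lower_slice10_ne _ (fun hlt => hx (Or.inr hlt))
      simp only [pvKeyCat, if_neg hne]
      rfl

theorem keyCat_class (k : Option String) :
    ∀ g ∈ pvGroups, (pvKeyCat k = g.1 ↔ k ∈ g.2) := by
  cases k with
  | none => decide
  | some s =>
    by_cases h0 : s = ""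
    · subst h0; decide
    by_cases h1 : s = "0x38ed1739"
    · subst h1; decide
    by_cases h2 : s = "0x7ff36ab5"
    · subst h2; decide
    by_cases h3 : s = "0x18cbafe5"
    · subst h3; decide
    by_cases h4 : s = "0xc04b8d59"
    · subst h4; decide
    by_cases h5 : s = "0x12aa3caf"
    · subst h5; decide
    by_cases h6 : s = "0x0502b1c5"
    · subst h6; decide
    by_cases h7 : s = "0xe8e33700"
    · subst h7; decide
    by_cases h8 : s = "0xf305d719"
    · subst h8; decide
    by_cases h9 : s = "0xbaa2abde"
    · subst h9; decide
    by_cases h10 : s = "0x02751cec"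
    · subst h10; decide
    by_cases h11 : s = "0x42842e0e"
    · subst h11; decide
    by_cases h12 : s = "0xb88d4fde"
    · subst h12; decide
    by_cases h13 : s = "0xfb0f3ee1"
    · subst h13; decide
    by_cases h14 : s = "0x87201b41"
    · subst h14; decide
    by_cases h15 : s = "0x9a1fc3a7"
    · subst h15; decide
    by_cases h16 : s = "0x095ea7b3"
    · subst h16; decide
    by_cases h17 : s = "0xa9059cbb"
    · subst h17; decide
    by_cases h18 : s = "0x23b872dd"
    · subst h18; decide
    by_cases h19 : s = "0xe8eda9df"
    · subst h19; decide
    by_cases h20 : s = "0x69328dec"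
    · subst h20; decide
    by_cases h21 : s = "0xa415bcad"
    · subst h21; decide
    by_cases h22 : s = "0x573ade81"
    · subst h22; decide
    by_cases h23 : s = "0x617ba037"
    · subst h23; decide
    by_cases h24 : s = "0xa0712d68"
    · subst h24; decide
    by_cases h25 : s = "0xdb006a75"
    · subst h25; decide
    by_cases h26 : s = "0xc5ebeaec"
    · subst h26; decide
    by_cases h27 : s = "0xa1903eab"
    · subst h27; decide
    intro g hg
    simp only [pvGroups, List.mem_cons, List.not_mem_nil, or_false] at hg
    have hcas : pvKeyCat (some s) = "other" := by
      simp [pvKeyCat, pvCascade, h0, h1, h2, h3, h4, h5, h6, h7, h8, h9, h10, h11, h12, h13, h14, h15, h16, h17, h18, h19, h20, h21, h22, h23, h24, h25, h26, h27]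
    rcases hg with rfl|rfl|rfl|rfl|rfl|rfl|rfl|rfl|rfl <;>
      simp [hcas, h0, h1, h2, h3, h4, h5, h6, h7, h8, h9, h10, h11, h12, h13, h14, h15, h16, h17, h18, h19, h20, h21, h22, h23, h24, h25, h26, h27]

theorem sum_counts {α : Type} [BEq α] [LawfulBEq α] (keys : List α) (l : List α) (h : keys.Nodup) :
    (keys.map (fun k => ((l.count k : Nat) : Int))).sum = ((l.countP (fun x => keys.contains x) : Nat) : Int) := by
  induction keys with
  | nil => simp
  | cons k ks ih =>
    rcases List.nodup_cons.mp h with ⟨hk, hks⟩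
    have hsplit : ∀ m : List α, m.countP (fun x => (k :: ks).contains x) = m.count k + m.countP (fun x => ks.contains x) := by
      intro m
      induction m with
      | nil => simp
      | cons a m ihm =>
        rw [List.countP_cons, List.countP_cons, List.count_cons, ihm]
        by_cases hak : a = k
        · subst hak; simp [hk]; omega
        · simp [hak]
          by_cases has : a ∈ ks
          · simp [has]; omega
          · simp [has]
    rw [List.map_cons, List.sum_cons, ih hks, hsplit]
    push_cast
    ring

theorem cat_mem (tx : List (String × String)) : categorize_transaction tx ∈ pvCategories := by
  simp only [categorize_transaction, pvCategories]
  split_ifs <;> simp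

theorem set_update_self {s : PySem.Set String} {l : List String}
    (h : ∀ x ∈ l, x ∈ s) : PySem.Set.update s l = s := by
  induction l generalizing s with
  | nil => rfl
  | cons a l ih =>
    have ha : PySem.Set.add s a = s := by
      simp [PySem.Set.add, PySem.Set.contains, h a (List.mem_cons_self ..)]
    show (a :: l).foldl PySem.Set.add s = s
    rw [List.foldl_cons, ha]
    exact ih fun x hx => h x (List.mem_cons_of_mem _ hx)

set_option maxHeartbeats 1000000 in
theorem A_items (transactions : List (List (String × String))) :
    get_transaction_summary transactions =
      pvCategories.map (fun k => (k, ((transactions.map categorize_transaction).count k : Int))) := by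
  unfold get_transaction_summary
  show (List.foldl (fun s tx =>
      (fun (s : PySem.Dict String Int) (x : String) => s.insert x (s.getD x 0 + 1)) s
        (categorize_transaction tx))
      (PySem.Dict.mk [("transfer", 0), ("swap", 0), ("liquidity", 0), ("nft", 0), ("approval", 0),
        ("token_transfer", 0), ("lending", 0), ("staking", 0), ("contract_creation", 0), ("other", 0)])
      transactions).items =
    List.map (fun k => (k, ((transactions.map categorize_transaction).count k : Int))) pvCategories
  rw [← List.foldl_map (f := categorize_transaction)
    (g := fun (s : PySem.Dict String Int) (x : String) => s.insert x (s.getD x 0 + 1))]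
  set d0 : PySem.Dict String Int := PySem.Dict.mk [("transfer", 0), ("swap", 0), ("liquidity", 0), ("nft", 0), ("approval", 0),
        ("token_transfer", 0), ("lending", 0), ("staking", 0), ("contract_creation", 0), ("other", 0)] with hd0
  set l := transactions.map categorize_transaction with hl
  have hkeys : ((l.foldl (fun s x => s.insert x (s.getD x 0 + 1)) d0)).keys = pvCategories := by
    rw [PySem.Dict.keys_foldl_insert]
    have hk0 : d0.keys = pvCategories := by rw [hd0]; decide
    rw [hk0]
    exact set_update_self (by
      intro x hx
      rw [hl] at hx
      obtain ⟨tx, _, rfl⟩ := List.mem_map.mp hx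
      exact cat_mem tx)
  have hnodup : ((l.foldl (fun s x => s.insert x (s.getD x 0 + 1)) d0)).keys.Nodup := by
    rw [hkeys]; decide
  rw [PySem.Dict.items_eq_map_keys _ hnodup 0, hkeys]
  apply List.map_congr_left
  intro k hk
  rw [PySem.Dict.getD_foldl_insert_add_one]
  have hz : d0.getD k 0 = 0 := by
    simp only [pvCategories, List.mem_cons, List.not_mem_nil, or_false] at hk
    rcases hk with rfl|rfl|rfl|rfl|rfl|rfl|rfl|rfl|rfl|rfl <;> (rw [hd0]; decide)
  rw [hz, zero_add]

theorem group_count (keyList : List (Option String)) (g : String × List (Option String))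
    (hg : g ∈ pvGroups) :
    (g.2.map (fun k => ((PySem.Dict.counter keyList).getD k 0))).sum =
      (((keyList.map pvKeyCat).count g.1 : Nat) : Int) := by
  have hnd : g.2.Nodup := by
    have hall : ∀ g' ∈ pvGroups, (g'.2).Nodup := by decide
    exact hall g hg
  have h1 : g.2.map (fun k => ((PySem.Dict.counter keyList).getD k 0)) =
      g.2.map (fun k => ((keyList.count k : Nat) : Int)) :=
    List.map_congr_left fun k _ => PySem.Dict.getD_counter ..
  rw [h1, sum_counts _ _ hnd]
  congr 1
  rw [List.count_eq_countP, List.countP_map]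
  refine List.countP_congr fun k _ => ?_
  have hiff := keyCat_class k g hg
  simp only [Function.comp_apply, List.contains_eq_mem, decide_eq_true_eq, beq_iff_eq]
  exact hiff.symm

set_option maxHeartbeats 1000000 in
theorem get_transaction_summary_eq (transactions : List (List (String × String))) :
    get_transaction_summary transactions = get_transaction_summary_alt transactions := by
  simp only [get_transaction_summary_alt]
  rw [A_items]
  set keyList := transactions.map tx_key with hkl
  set cats := transactions.map categorize_transaction with hc
  have hhist : (transactions.foldl (fun d tx =>
      d.insert (tx_key tx) (d.getD (tx_key tx) 0 + 1)) PySem.Dict.empty) = PySem.Dict.counter keyList := by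
    rw [hkl, ← List.foldl_map (f := tx_key)
      (g := fun (d : PySem.Dict (Option String) Int) (k : Option String) => d.insert k (d.getD k 0 + 1))]
    exact PySem.Dict.foldl_insert_getD_add_one_eq_counter _
  rw [hhist]
  have hck : cats = keyList.map pvKeyCat := by
    rw [hc, hkl, List.map_map]
    exact List.map_congr_left fun tx _ => cat_eq_keyCat tx
  have hgv : pvGroups.map (fun g => (g.1, (g.2.map (fun k => (PySem.Dict.counter keyList).getD k 0)).sum)) =
      pvGroups.map (fun g => (g.1, ((cats.count g.1 : Nat) : Int))) :=
    List.map_congr_left fun g hg => by rw [group_count keyList g hg, hck]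
  rw [hgv]
  have hlen : PySem.List.len transactions = (cats.length : Int) := by
    rw [PySem.List.len_eq, hc, List.length_map]
  rw [hlen]
  have htotal : (pvCategories.map (fun k => ((cats.count k : Nat) : Int))).sum = (cats.length : Int) := by
    rw [sum_counts _ _ (by decide)]
    congr 1
    exact List.countP_eq_length.mpr fun x hx => by
      rw [hc] at hx
      obtain ⟨tx, _, rfl⟩ := List.mem_map.mp hx
      simpa using cat_mem tx
  simp only [pvCategories, pvGroups, List.map_cons, List.map_nil, List.sum_cons, List.sum_nil] at htotal ⊢
  rw [List.cons_append, List.cons_append, List.cons_append, List.cons_append, List.cons_append,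
    List.cons_append, List.cons_append, List.cons_append, List.cons_append, List.nil_append]
  simp only [List.cons.injEq, Prod.mk.injEq, true_and, and_true]
  omega

-- ===== VERDICT (by name: the statement is the Claim_ definition above) =====
theorem get_transaction_summary_spec : Claim_equal_get_transaction_summary := by
  intro transactions _
  unfold Spec_get_transaction_summary
  exact get_transaction_summary_eq transactions
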